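-- pv_equiv track=rewrite | github.com/clg-admin/openmodels_lac | GUA/Modelos/Residuos/Auxiliares.py | DetectarVectorCero
-- ===== SOURCE A (Python) =====
-- def DetectarVectorCero(lista): ### NO era necesariamente verdad, por lo que se le agregó el abs()
--     suma=0
--     for i in lista:
--         suma=suma+abs(i)
--     if suma==0:
--         return 1
--     else:
--         return 0
-- ===== SOURCE B (Python) =====
-- def DetectarVectorCero(lista):
--     return 1 if set(lista) <= {0} else 0
-- ===== Notes on version B (the rewrite author's own statement) =====
-- stated objective: idiomatic
-- what changed: Replaces the running absolute-value sum with building the set of distinct elements once and testing subset of {0}.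
import Mathlib
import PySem

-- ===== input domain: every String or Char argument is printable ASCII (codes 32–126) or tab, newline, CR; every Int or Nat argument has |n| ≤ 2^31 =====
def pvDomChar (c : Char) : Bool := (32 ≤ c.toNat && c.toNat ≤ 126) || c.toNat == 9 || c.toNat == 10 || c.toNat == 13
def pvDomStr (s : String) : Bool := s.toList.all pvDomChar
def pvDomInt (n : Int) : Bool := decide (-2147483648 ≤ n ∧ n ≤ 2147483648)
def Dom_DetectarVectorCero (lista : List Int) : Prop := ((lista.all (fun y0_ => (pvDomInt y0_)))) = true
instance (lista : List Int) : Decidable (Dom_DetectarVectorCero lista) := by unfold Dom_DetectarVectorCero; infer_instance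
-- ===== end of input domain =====

-- B replaces the running absolute-value sum with building the set of distinct elements once and testing subset of {0} (idiomatic; not faster).
-- ===== PORT A =====
def DetectarVectorCero (lista : List Int) : Int :=
  let suma := lista.foldl (fun suma i => suma + |i|) 0
  if suma = 0 then 1 else 0

-- ===== PORT B =====
def DetectarVectorCero_alt (lista : List Int) : Int :=
  if PySem.Set.issubset (PySem.Set.ofList lista) (PySem.Set.ofList [0]) then 1 else 0

-- ===== PRECONDITION & SPEC =====
def Spec_DetectarVectorCero (lista : List Int) (out : Int) : Prop := out = DetectarVectorCero_alt lista
instance (lista : List Int) (out : Int) : Decidable (Spec_DetectarVectorCero lista out) := by unfold Spec_DetectarVectorCero; infer_instance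

-- ===== CLAIM (what is proved, stated in full; the proofs are below) =====
def Claim_equal_DetectarVectorCero : Prop := ∀ (lista : List Int), Dom_DetectarVectorCero lista → Spec_DetectarVectorCero lista (DetectarVectorCero lista)

-- ===== LEMMAS AND PROOFS =====

-- ===== VERDICT (by name: the statement is the Claim_ definition above) =====
theorem abs_sum_zero (lista : List Int) (acc : Int) (h : 0 ≤ acc) :
    (lista.foldl (fun s i => s + |i|) acc = 0) ↔ (acc = 0 ∧ ∀ x ∈ lista, x = 0) := by
  induction lista generalizing acc with
  | nil => simp [le_antisymm_iff, h]
  | cons a t ih =>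
    simp only [List.foldl_cons, List.mem_cons]
    have habs : 0 ≤ |a| := abs_nonneg a
    rw [show List.foldl (fun s i => s + |i|) (acc + |a|) t = 0 ↔
        acc + |a| = 0 ∧ ∀ x ∈ t, x = 0 from ih (acc + |a|) (by positivity)]
    constructor
    · rintro ⟨h1, h2⟩
      have ha : a = 0 ∧ acc = 0 := by
        have : |a| = 0 ∧ acc = 0 := by omega
        exact ⟨abs_eq_zero.1 this.1, this.2⟩
      exact ⟨ha.2, fun x hx => hx.elim (fun e => e ▸ ha.1) (h2 x)⟩
    · rintro ⟨h1, h2⟩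
      have ha : a = 0 := h2 a (Or.inl rfl)
      refine ⟨by simp [h1, ha], fun x hx => h2 x (Or.inr hx)⟩

theorem DetectarVectorCero_spec : Claim_equal_DetectarVectorCero := by
  intro lista _
  unfold Spec_DetectarVectorCero DetectarVectorCero DetectarVectorCero_alt
  dsimp only
  have hsub : PySem.Set.issubset (PySem.Set.ofList lista) (PySem.Set.ofList [0]) = true ↔
      ∀ x ∈ lista, x = 0 := by
    rw [PySem.Set.issubset_iff]
    constructor
    · intro h x hx
      have := h x ((PySem.Set.mem_ofList _ _).2 hx)
      simpa [PySem.Set.ofList] using (PySem.Set.mem_ofList _ _).1 this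
    · intro h x hx
      have := h x ((PySem.Set.mem_ofList _ _).1 hx)
      simp [PySem.Set.ofList, this]
  have hfold : (lista.foldl (fun suma i => suma + |i|) 0 = 0) ↔ ∀ x ∈ lista, x = 0 := by
    rw [abs_sum_zero lista 0 le_rfl]; simp
  split_ifs with h1 h2 h2
  · rfl
  · exact absurd (hsub.2 (hfold.1 h1)) h2
  · exact absurd (hfold.2 (hsub.1 h2)) h1
  · rfl
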